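-- pv_equiv track=rewrite | github.com/CapitanWid/analizador_lexico_tfl | analizadorLexicoPython/app1.py | calcular_posicion
-- ===== SOURCE A (Python) =====
-- def calcular_posicion(codigo_fuente, indice):
--     # Esta función calcula la línea y columna basadas en el índice
--     line = 1
--     col = 1
--     for i in range(indice):
--         if codigo_fuente[i] == '\n':
--             line += 1
--             col = 1
--         else:
--             col += 1
--     return line, col
-- ===== SOURCE B (Python) =====
-- def calcular_posicion(codigo_fuente, indice):
--     # Position from the prefix before `indice`: count newlines for the line,
--     # distance past the last newline for the column.
--     prefix = codigo_fuente[:max(indice, 0)]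
--     line = prefix.count('\n') + 1
--     col = len(prefix) - prefix.rfind('\n')
--     return line, col
-- ===== Notes on version B (the rewrite author's own statement) =====
-- stated objective: idiomatic
-- what changed: Replaces the per-character accumulator loop with string-level scans of the prefix: line = prefix.count('\n') + 1 and col = len(prefix) - prefix.rfind('\n').
import Mathlib
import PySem

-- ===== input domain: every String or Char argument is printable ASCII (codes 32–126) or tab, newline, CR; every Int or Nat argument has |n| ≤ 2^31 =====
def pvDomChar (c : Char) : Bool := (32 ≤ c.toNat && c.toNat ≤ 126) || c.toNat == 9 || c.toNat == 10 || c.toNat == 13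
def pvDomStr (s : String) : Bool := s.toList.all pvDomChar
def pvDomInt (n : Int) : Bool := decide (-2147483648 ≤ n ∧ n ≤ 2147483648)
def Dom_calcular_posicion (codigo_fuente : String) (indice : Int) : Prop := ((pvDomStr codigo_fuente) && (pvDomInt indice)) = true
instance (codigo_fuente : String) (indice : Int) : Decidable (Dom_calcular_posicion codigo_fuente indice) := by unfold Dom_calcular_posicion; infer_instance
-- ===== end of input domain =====

-- B replaces A's per-character line/column accumulator loop with string-level
-- scans of the prefix (count of '\n' and rfind of the last '\n'): idiomatic, same O(n).


-- ===== PORT A =====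
-- `codigo_fuente[i]` is in range for every i in range(indice) under Pre_; pyGetD is its exact port there.
def calcular_posicion (codigo_fuente : String) (indice : Int) : Int × Int :=
  (PySem.List.pyRange 0 indice).foldl
    (fun (st : Int × Int) i =>
      if PySem.List.pyGetD codigo_fuente.toList i ' ' = '\n' then (st.1 + 1, 1)
      else (st.1, st.2 + 1))
    (1, 1)

-- ===== PORT B =====
def calcular_posicion_alt (codigo_fuente : String) (indice : Int) : Int × Int :=
  let pfx := PySem.Str.slice codigo_fuente none (some (max indice 0))
  ((PySem.Str.count pfx "\n" : Int) + 1,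
   PySem.Str.len pfx - PySem.Str.rfind pfx "\n")

-- ===== PRECONDITION & SPEC =====
-- Pre_ excludes exactly the inputs where A raises IndexError (indice beyond the string's length).
def Pre_calcular_posicion (codigo_fuente : String) (indice : Int) : Prop :=
  indice ≤ (codigo_fuente.toList.length : Int)
instance (codigo_fuente : String) (indice : Int) : Decidable (Pre_calcular_posicion codigo_fuente indice) := by unfold Pre_calcular_posicion; infer_instance
def pvWitness_calcular_posicion : String × Int := ("a\nb", 2)

def Spec_calcular_posicion (codigo_fuente : String) (indice : Int) (out : Int × Int) : Prop := out = calcular_posicion_alt codigo_fuente indice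
instance (codigo_fuente : String) (indice : Int) (out : Int × Int) : Decidable (Spec_calcular_posicion codigo_fuente indice out) := by unfold Spec_calcular_posicion; infer_instance

-- ===== CLAIM (what is proved, stated in full; the proofs are below) =====
def Claim_equal_calcular_posicion : Prop := ∀ (codigo_fuente : String) (indice : Int), Dom_calcular_posicion codigo_fuente indice → Pre_calcular_posicion codigo_fuente indice → Spec_calcular_posicion codigo_fuente indice (calcular_posicion codigo_fuente indice)

-- ===== LEMMAS AND PROOFS =====

-- A's loop body, as a function of the character read.
def pvStep (st : Int × Int) (c : Char) : Int × Int :=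
  if c = '\n' then (st.1 + 1, 1) else (st.1, st.2 + 1)

theorem pv_count_go (c : Char) (fuel : Nat) :
    ∀ (l : List Char) (acc : Nat), l.length ≤ fuel →
      PySem.Chars.count.go [c] fuel l acc = acc + l.count c := by
  induction fuel with
  | zero =>
    intro l acc h
    have : l = [] := List.eq_nil_of_length_eq_zero (Nat.le_zero.mp h)
    subst this; simp [PySem.Chars.count.go]
  | succ n ih =>
    intro l acc h
    cases l with
    | nil => simp [PySem.Chars.count.go]
    | cons x t =>
      have h' : t.length ≤ n := by simpa using h
      simp only [PySem.Chars.count.go]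
      by_cases hx : ([c].isPrefixOf (x :: t)) = true
      · have hcx : c = x := by simpa [List.isPrefixOf] using hx
        rw [if_pos hx]
        simp only [List.length_cons, List.length_nil, Nat.zero_add, List.drop_succ_cons,
          List.drop_zero]
        rw [ih t (acc + 1) h']
        simp [hcx]
        omega
      · have hcx : ¬ (x = c) := by
          intro e; exact hx (by simp [List.isPrefixOf, e])
        rw [if_neg hx]
        rw [ih t acc h']
        simp [hcx]

theorem pv_count_singleton (c : Char) (l : List Char) :
    PySem.Chars.count l [c] = l.count c := by
  simp only [PySem.Chars.count, List.isEmpty_cons, Bool.false_eq_true, if_false]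
  simpa using pv_count_go c l.length l 0 le_rfl

theorem pv_rfind_nil (c : Char) : PySem.Chars.rfind [] [c] = -1 := by
  simp [PySem.Chars.rfind, PySem.Chars.rfind.go, List.isPrefixOf]

theorem pv_prefix_singleton_append (c a : Char) (q : List Char) (hq : q ≠ []) :
    ([c].isPrefixOf (q ++ [a])) = ([c].isPrefixOf q) := by
  cases q with
  | nil => exact absurd rfl hq
  | cons x t => simp [List.isPrefixOf]

theorem pv_rfind_go_append (p : List Char) (a c : Char) :
    ∀ j, j < p.length →
      PySem.Chars.rfind.go (p ++ [a]) [c] j = PySem.Chars.rfind.go p [c] j := by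
  intro j
  induction j with
  | zero =>
    intro h
    simp only [PySem.Chars.rfind.go]
    rw [pv_prefix_singleton_append c a p (by intro e; subst e; simp at h)]
  | succ m ih =>
    intro h
    have hm : m + 1 ≤ p.length := Nat.le_of_lt h
    simp only [PySem.Chars.rfind.go]
    rw [List.drop_append_of_le_length hm,
        pv_prefix_singleton_append c a _ (by simp [List.drop_eq_nil_iff]; omega),
        ih (by omega)]

theorem pv_rfind_append (p : List Char) (a c : Char) :
    PySem.Chars.rfind (p ++ [a]) [c] =
      if a = c then (p.length : Int) else PySem.Chars.rfind p [c] := by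
  unfold PySem.Chars.rfind
  have hlen : (p ++ [a]).length = p.length + 1 := by simp
  rw [hlen]
  conv_lhs => rw [show PySem.Chars.rfind.go (p ++ [a]) [c] (p.length + 1) =
      (if ([c].isPrefixOf (List.drop (p.length + 1) (p ++ [a]))) = true
        then ((p.length : Int) + 1) else PySem.Chars.rfind.go (p ++ [a]) [c] p.length) from by
    simp only [PySem.Chars.rfind.go]; push_cast; rfl]
  rw [if_neg (by simp [List.drop_eq_nil_of_le])]
  cases p with
  | nil =>
    simp only [List.nil_append, List.length_nil]
    simp only [PySem.Chars.rfind.go, List.isPrefixOf, Bool.and_true]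
    by_cases hac : a = c
    · simp [hac]
    · have : ¬ (c = a) := fun e => hac e.symm
      simp [hac, this]
  | cons x t =>
    simp only [List.length_cons]
    conv_lhs => rw [show PySem.Chars.rfind.go ((x :: t) ++ [a]) [c] (t.length + 1) =
        (if ([c].isPrefixOf (List.drop (t.length + 1) ((x :: t) ++ [a]))) = true
          then ((t.length : Int) + 1) else PySem.Chars.rfind.go ((x :: t) ++ [a]) [c] t.length)
        from by simp only [PySem.Chars.rfind.go]; push_cast; rfl]
    have hdrop : List.drop (t.length + 1) ((x :: t) ++ [a]) = [a] := by
      rw [List.drop_append_of_le_length (by simp)]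
      simp [List.drop_eq_nil_of_le]
    rw [hdrop]
    by_cases hac : a = c
    · rw [if_pos (by simp [List.isPrefixOf, hac]), if_pos hac]
      push_cast; ring
    · rw [if_neg (by simp [List.isPrefixOf]; exact fun e => hac e.symm), if_neg hac]
      rw [pv_rfind_go_append (x :: t) a c t.length (by simp)]
      conv_rhs => rw [show PySem.Chars.rfind.go (x :: t) [c] (t.length + 1) =
          (if ([c].isPrefixOf (List.drop (t.length + 1) (x :: t))) = true
            then ((t.length : Int) + 1) else PySem.Chars.rfind.go (x :: t) [c] t.length)
          from by simp only [PySem.Chars.rfind.go]; push_cast; rfl]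
      rw [if_neg (by simp [List.drop_eq_nil_of_le])]

theorem pv_main (l : List Char) :
    l.foldl pvStep (1, 1) =
      ((l.count '\n' : Int) + 1, (l.length : Int) - PySem.Chars.rfind l ['\n']) := by
  induction l using List.reverseRecOn with
  | nil => simp [pv_rfind_nil]
  | append_singleton p a ih =>
    rw [List.foldl_append, ih, pv_rfind_append]
    by_cases hac : a = '\n'
    · subst hac
      simp [pvStep, List.count_append]
    · rw [if_neg hac]
      simp only [List.foldl_cons, List.foldl_nil, pvStep, if_neg hac]
      simp [List.count_append, hac]
      ring

theorem pv_foldTake (l : List Char) (n : Nat) (h : n ≤ l.length) :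
    (PySem.List.pyRange 0 (n : Int)).foldl
      (fun st i => pvStep st (PySem.List.pyGetD l i ' ')) (1, 1) =
    (l.take n).foldl pvStep (1, 1) := by
  induction n with
  | zero => simp
  | succ m ih =>
    have hm : m ≤ l.length := Nat.le_of_succ_le h
    have hlt : m < l.length := h
    rw [PySem.List.pyRange_zero_natCast, List.range_succ, List.map_append, List.foldl_append,
        ← PySem.List.pyRange_zero_natCast, ih hm]
    rw [List.take_add_one, List.getElem?_eq_getElem hlt, List.foldl_append]
    simp only [List.map_cons, List.map_nil, Option.toList_some, List.foldl_cons, List.foldl_nil,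
      PySem.List.pyGetD_natCast]
    rw [List.getD_eq_getElem?_getD, List.getElem?_eq_getElem hlt]
    simp only [Option.getD_some]

theorem pv_alt_eq (s : String) (i : Int) (n : Nat) (hn : max i 0 = (n : Int)) :
    calcular_posicion_alt s i =
      (((s.toList.take n).count '\n' : Int) + 1,
       ((s.toList.take n).length : Int) - PySem.Chars.rfind (s.toList.take n) ['\n']) := by
  have htl : (PySem.Str.slice s none (some (max i 0))).toList = s.toList.take n := by
    rw [PySem.Str.toList_slice, PySem.Chars.slice_eq_listSlice, hn,
        PySem.List.slice_to_natCast]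
  simp only [calcular_posicion_alt, PySem.Str.count_eq, PySem.Str.rfind_eq, PySem.Str.len_eq,
    htl, show ("\n".toList) = ['\n'] from rfl, pv_count_singleton]

-- ===== VERDICT (by name: the statement is the Claim_ definition above) =====
theorem calcular_posicion_spec : Claim_equal_calcular_posicion := by
  intro s i _ hpre
  unfold Spec_calcular_posicion
  unfold Pre_calcular_posicion at hpre
  by_cases hi : i ≤ 0
  · have hmax : max i 0 = ((0 : Nat) : Int) := by omega
    rw [pv_alt_eq s i 0 hmax]
    unfold calcular_posicion
    rw [show PySem.List.pyRange 0 i = [] from by simp [PySem.List.pyRange]; omega]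
    simp [pv_rfind_nil]
  · have hn : max i 0 = ((i.toNat : Nat) : Int) := by omega
    have hle : i.toNat ≤ s.toList.length := by omega
    rw [pv_alt_eq s i i.toNat hn, ← pv_main]
    unfold calcular_posicion
    rw [show i = ((i.toNat : Nat) : Int) from by omega]
    exact pv_foldTake s.toList i.toNat hle
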